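-- pv_equiv track=rewrite | github.com/ilubuntu/SkillTest | agent_bench/pipeline/compile_checker.py | _clean_markdown_code_blocks
-- ===== SOURCE A (Python) =====
-- def _clean_markdown_code_blocks(code: str) -> str:
--     """提取 markdown 代码块内的代码，无代码块则原样返回"""
--     lines = code.split('\n')
--     cleaned_lines = []
--     in_code_block = False
--     has_code_block = False
--
--     for line in lines:
--         stripped = line.strip()
--         if stripped.startswith('```'):
--             if not in_code_block:
--                 in_code_block = True
--                 has_code_block = True
--             else:
--                 in_code_block = False
--             continue
--         if in_code_block:
--             cleaned_lines.append(line)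
--
--     if not has_code_block:
--         return code.strip()
--     return '\n'.join(cleaned_lines).strip()
-- ===== SOURCE B (Python) =====
-- def _clean_markdown_code_blocks(code: str) -> str:
--     """提取 markdown 代码块内的代码，无代码块则原样返回"""
--     segments = []
--     current = []
--     for line in code.split('\n'):
--         if line.strip().startswith('```'):
--             segments.append(current)
--             current = []
--         else:
--             current.append(line)
--     segments.append(current)
--     if len(segments) == 1:
--         return code.strip()
--     inner = [ln for seg in segments[1::2] for ln in seg]
--     return '\n'.join(inner).strip()
-- ===== Notes on version B (the rewrite author's own statement) =====
-- stated objective: alternative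
-- what changed: B replaces A's in_code_block boolean toggle (appending lines while inside a block) with a split-into-segments-at-fence-lines pass followed by selecting the odd-indexed segments (the block interiors, including the tail after an unclosed fence) and flattening them.
import Mathlib
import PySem

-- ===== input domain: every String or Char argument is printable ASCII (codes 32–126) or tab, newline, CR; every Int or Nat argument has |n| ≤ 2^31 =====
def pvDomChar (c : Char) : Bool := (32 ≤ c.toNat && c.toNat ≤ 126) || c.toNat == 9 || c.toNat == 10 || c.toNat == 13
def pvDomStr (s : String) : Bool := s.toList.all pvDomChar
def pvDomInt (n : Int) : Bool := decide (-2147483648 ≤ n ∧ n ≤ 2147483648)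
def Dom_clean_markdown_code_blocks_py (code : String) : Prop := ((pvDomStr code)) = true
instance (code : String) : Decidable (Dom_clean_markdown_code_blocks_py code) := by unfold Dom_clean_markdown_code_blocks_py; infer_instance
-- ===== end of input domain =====

-- B replaces A's in_code_block toggle with a split-into-segments-at-fences pass and keeps every
-- odd-indexed segment (objective: alternative decomposition, same cost).

-- ===== PORT A =====
-- A's loop state: (cleaned_lines, in_code_block, has_code_block)
def cmcbAStep (st : List String × Bool × Bool) (line : String) : List String × Bool × Bool :=
  let stripped := PySem.Str.strip line
  if PySem.Str.startswith stripped "```" then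
    if !st.2.1 then (st.1, true, true) else (st.1, false, st.2.2)
  else if st.2.1 then (st.1 ++ [line], st.2.1, st.2.2)
  else st

def clean_markdown_code_blocks_py (code : String) : String :=
  let lines := (PySem.Str.split? code "\n").getD []
  let st := lines.foldl cmcbAStep ([], false, false)
  if !st.2.2 then PySem.Str.strip code
  else PySem.Str.strip (PySem.Str.join "\n" st.1)

-- ===== PORT B =====
def cmcbFence (line : String) : Bool :=
  PySem.Str.startswith (PySem.Str.strip line) "```"

-- B's loop state: (segments, current)
def cmcbBStep (st : List (List String) × List String) (line : String) : List (List String) × List String :=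
  if cmcbFence line then (st.1 ++ [st.2], []) else (st.1, st.2 ++ [line])

-- hand port of Python's segments[1::2] (PySem.List.slice has no step): elements at odd indices
def cmcbOdd : List (List String) → List (List String)
  | [] => []
  | [_] => []
  | _ :: b :: rest => b :: cmcbOdd rest

def clean_markdown_code_blocks_py_alt (code : String) : String :=
  let st := ((PySem.Str.split? code "\n").getD []).foldl cmcbBStep ([], [])
  let segments := st.1 ++ [st.2]
  if segments.length == 1 then PySem.Str.strip code
  else PySem.Str.strip (PySem.Str.join "\n" ((cmcbOdd segments).flatMap id))

-- ===== PRECONDITION & SPEC =====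
def Spec_clean_markdown_code_blocks_py (code : String) (out : String) : Prop := out = clean_markdown_code_blocks_py_alt code
instance (code : String) (out : String) : Decidable (Spec_clean_markdown_code_blocks_py code out) := by unfold Spec_clean_markdown_code_blocks_py; infer_instance

-- ===== CLAIM (what is proved, stated in full; the proofs are below) =====
def Claim_equal_clean_markdown_code_blocks_py : Prop := ∀ (code : String), Dom_clean_markdown_code_blocks_py code → Spec_clean_markdown_code_blocks_py code (clean_markdown_code_blocks_py code)

-- ===== LEMMAS AND PROOFS =====

lemma cmcbOdd_append_singleton (segs : List (List String)) (c : List String) :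
    cmcbOdd (segs ++ [c]) = cmcbOdd segs ++ (if segs.length % 2 = 1 then [c] else []) := by
  induction segs using cmcbOdd.induct with
  | case1 => simp [cmcbOdd]
  | case2 a => simp [cmcbOdd]
  | case3 a b rest ih =>
    have h2 : (rest.length + 1 + 1) % 2 = rest.length % 2 := by omega
    simp [cmcbOdd, ih, h2]

-- the loop invariant: A's fold state is determined by B's fold state
lemma cmcb_loop (lines : List String) : ∀ (segs : List (List String)) (cur : List String),
    lines.foldl cmcbAStep ((cmcbOdd (segs ++ [cur])).flatMap id,
      (segs.length % 2 == 1), !segs.isEmpty)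
    = ((cmcbOdd ((lines.foldl cmcbBStep (segs, cur)).1 ++ [(lines.foldl cmcbBStep (segs, cur)).2])).flatMap id,
       ((lines.foldl cmcbBStep (segs, cur)).1.length % 2 == 1),
       !(lines.foldl cmcbBStep (segs, cur)).1.isEmpty) := by
  induction lines with
  | nil => intro segs cur; simp
  | cons l rest ih =>
    intro segs cur
    simp only [List.foldl_cons]
    by_cases hf : cmcbFence l
    · have hB : cmcbBStep (segs, cur) l = (segs ++ [cur], []) := by simp [cmcbBStep, hf]
      have hA : cmcbAStep ((cmcbOdd (segs ++ [cur])).flatMap id,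
          (segs.length % 2 == 1), !segs.isEmpty) l
          = ((cmcbOdd ((segs ++ [cur]) ++ [[]])).flatMap id,
             ((segs ++ [cur]).length % 2 == 1), !(segs ++ [cur]).isEmpty) := by
        have h1 : (cmcbOdd (segs ++ [cur, []])).flatten
            = (cmcbOdd (segs ++ [cur])).flatten := by
          rw [show segs ++ [cur, []] = (segs ++ [cur]) ++ [[]] from by simp,
              cmcbOdd_append_singleton]
          split <;> simp
        unfold cmcbFence at hf
        simp only [cmcbAStep]
        rw [if_pos hf]
        rcases Nat.mod_two_eq_zero_or_one segs.length with h | h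
        · simp [h, h1, Nat.add_mod]
        · have hne : segs ≠ [] := by intro h0; simp [h0] at h
          refine Prod.ext ?_ (Prod.ext ?_ ?_) <;> simp [h, h1, Nat.add_mod]
          cases segs with
          | nil => exact absurd rfl hne
          | cons a t => simp
      rw [hA]; rw [hB]
      exact ih (segs ++ [cur]) []
    · have hB : cmcbBStep (segs, cur) l = (segs, cur ++ [l]) := by simp [cmcbBStep, hf]
      have hA : cmcbAStep ((cmcbOdd (segs ++ [cur])).flatMap id,
          (segs.length % 2 == 1), !segs.isEmpty) l
          = ((cmcbOdd (segs ++ [cur ++ [l]])).flatMap id,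
             (segs.length % 2 == 1), !segs.isEmpty) := by
        have h1 : ∀ c, (cmcbOdd (segs ++ [c])).flatMap id
            = (cmcbOdd segs).flatMap id ++ (if segs.length % 2 = 1 then c else []) := by
          intro c; rw [cmcbOdd_append_singleton]; split <;> simp
        unfold cmcbFence at hf
        simp only [cmcbAStep]
        rw [if_neg (by simpa using hf)]
        rcases Nat.mod_two_eq_zero_or_one segs.length with h | h
        · simp [h, h1]
        · simp [h, h1]
      rw [hA]; rw [hB]
      exact ih segs (cur ++ [l])

-- ===== VERDICT (by name: the statement is the Claim_ definition above) =====
theorem clean_markdown_code_blocks_py_spec : Claim_equal_clean_markdown_code_blocks_py := by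
  intro code _
  unfold Spec_clean_markdown_code_blocks_py
  simp only [clean_markdown_code_blocks_py, clean_markdown_code_blocks_py_alt]
  have h := cmcb_loop ((PySem.Str.split? code "\n").getD []) [] []
  norm_num [cmcbOdd] at h
  rw [show ((0:Nat) == 1) = false from rfl] at h
  rw [h]
  set r := ((PySem.Str.split? code "\n").getD []).foldl cmcbBStep ([], []) with hr
  by_cases he : r.1 = []
  · simp [he]
  · simp [he]
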